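-- pv_equiv track=rewrite | github.com/ji-eun-Gim/BOB14_A2A_Solution_Final | solution/app/core/signatures.py | _is_base64url
-- ===== SOURCE A (Python) =====
-- _BASE64URL_CHARS = set("ABCDEFGHIJKLMNOPQRSTUVWXYZabcdefghijklmnopqrstuvwxyz0123456789-_")
--
-- def _is_base64url(text: str) -> bool:
--     if not isinstance(text, str) or text == "":
--         return False
--     for ch in text:
--         if ch == '=':
--             continue
--         if ch not in _BASE64URL_CHARS:
--             return False
--     return True
-- ===== SOURCE B (Python) =====
-- import re
--
-- _B64URL_RE = re.compile(r'[A-Za-z0-9_=-]+')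
--
-- def _is_base64url(text: str) -> bool:
--     if not isinstance(text, str):
--         return False
--     return bool(_B64URL_RE.fullmatch(text))
-- ===== Notes on version B (the rewrite author's own statement) =====
-- stated objective: idiomatic
-- what changed: Replaced the explicit per-character loop with set membership (and a 'continue' for '=') by a single compiled-regex fullmatch against [A-Za-z0-9_=-]+, whose + quantifier rejects the empty string; the regex engine scans in C, removing per-character interpreter overhead.
import Mathlib
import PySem

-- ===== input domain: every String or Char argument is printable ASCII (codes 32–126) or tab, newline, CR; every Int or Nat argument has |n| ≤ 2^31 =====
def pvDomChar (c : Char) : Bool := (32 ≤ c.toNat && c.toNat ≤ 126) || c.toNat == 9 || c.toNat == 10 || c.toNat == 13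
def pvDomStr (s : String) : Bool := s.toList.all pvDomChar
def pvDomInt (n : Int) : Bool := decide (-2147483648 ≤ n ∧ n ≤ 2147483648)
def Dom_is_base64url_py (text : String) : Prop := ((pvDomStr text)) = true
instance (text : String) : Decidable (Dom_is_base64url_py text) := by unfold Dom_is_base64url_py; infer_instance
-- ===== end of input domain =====

-- B replaces A's explicit per-character loop (with a 'continue' for '=') by a single
-- regex fullmatch against the class [A-Za-z0-9_=-]+ (idiomatic); equivalence proved for all strings.

-- ===== PORT A =====
-- module constant: set("ABCDEFGHIJKLMNOPQRSTUVWXYZabcdefghijklmnopqrstuvwxyz0123456789-_")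
def pyBase64urlChars : PySem.Set Char :=
  PySem.Set.ofList ['A', 'B', 'C', 'D', 'E', 'F', 'G', 'H', 'I', 'J', 'K', 'L', 'M', 'N', 'O', 'P', 'Q', 'R', 'S', 'T', 'U', 'V', 'W', 'X', 'Y', 'Z', 'a', 'b', 'c', 'd', 'e', 'f', 'g', 'h', 'i', 'j', 'k', 'l', 'm', 'n', 'o', 'p', 'q', 'r', 's', 't', 'u', 'v', 'w', 'x', 'y', 'z', '0', '1', '2', '3', '4', '5', '6', '7', '8', '9', '-', '_']

-- the for-loop of A: 'continue' on '=', return False on a char outside the set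
def isB64Loop : List Char → Bool
  | [] => true
  | c :: rest =>
      if c = '=' then isB64Loop rest
      else if ¬ (c ∈ pyBase64urlChars) then false
      else isB64Loop rest

def is_base64url_py (text : String) : Bool :=
  -- isinstance(text, str) is always true under the type convention
  if text = "" then false
  else isB64Loop text.toList

-- ===== PORT B =====
-- one character of the regex class [A-Za-z0-9_=-]
def b64ClassChar (c : Char) : Bool :=
  ('A' ≤ c && c ≤ 'Z') || ('a' ≤ c && c ≤ 'z') || ('0' ≤ c && c ≤ '9')
    || c = '_' || c = '=' || c = '-'

-- bool(re.fullmatch(r'[A-Za-z0-9_=-]+', text)): nonempty and every char in the class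
def is_base64url_py_alt (text : String) : Bool :=
  !text.toList.isEmpty && text.toList.all b64ClassChar

-- ===== PRECONDITION & SPEC =====
def Spec_is_base64url_py (text : String) (out : Bool) : Prop := out = is_base64url_py_alt text
instance (text : String) (out : Bool) : Decidable (Spec_is_base64url_py text out) := by unfold Spec_is_base64url_py; infer_instance

-- ===== CLAIM (what is proved, stated in full; the proofs are below) =====
def Claim_equal_is_base64url_py : Prop := ∀ (text : String), Dom_is_base64url_py text → Spec_is_base64url_py text (is_base64url_py text)

-- ===== LEMMAS AND PROOFS =====

theorem char_eq_iff (a b : Char) : a = b ↔ a.toNat = b.toNat := by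
  constructor
  · intro h; rw [h]
  · intro h; apply Char.ext; exact UInt32.toNat_inj.mp h

theorem char_le_iff (a b : Char) : (a ≤ b) ↔ a.toNat ≤ b.toNat := by
  rw [Char.le_def, UInt32.le_iff_toNat_le]; rfl

-- one step of A's loop body agrees with B's character class
theorem mem_iff_class (c : Char) :
    (c = '=' || decide (c ∈ pyBase64urlChars)) = b64ClassChar c := by
  rw [Bool.eq_iff_iff]
  simp only [pyBase64urlChars, PySem.Set.mem_ofList, b64ClassChar, List.mem_cons,
    List.not_mem_nil, or_false, Bool.or_eq_true, Bool.and_eq_true, decide_eq_true_eq,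
    char_eq_iff, char_le_iff]
  simp only [show ('-').toNat = 45 from rfl, show ('0').toNat = 48 from rfl, show ('1').toNat = 49 from rfl, show ('2').toNat = 50 from rfl, show ('3').toNat = 51 from rfl, show ('4').toNat = 52 from rfl, show ('5').toNat = 53 from rfl, show ('6').toNat = 54 from rfl, show ('7').toNat = 55 from rfl, show ('8').toNat = 56 from rfl, show ('9').toNat = 57 from rfl, show ('=').toNat = 61 from rfl, show ('A').toNat = 65 from rfl, show ('B').toNat = 66 from rfl, show ('C').toNat = 67 from rfl, show ('D').toNat = 68 from rfl, show ('E').toNat = 69 from rfl, show ('F').toNat = 70 from rfl, show ('G').toNat = 71 from rfl, show ('H').toNat = 72 from rfl, show ('I').toNat = 73 from rfl, show ('J').toNat = 74 from rfl, show ('K').toNat = 75 from rfl, show ('L').toNat = 76 from rfl, show ('M').toNat = 77 from rfl, show ('N').toNat = 78 from rfl, show ('O').toNat = 79 from rfl, show ('P').toNat = 80 from rfl, show ('Q').toNat = 81 from rfl, show ('R').toNat = 82 from rfl, show ('S').toNat = 83 from rfl, show ('T').toNat = 84 from rfl, show ('U').toNat = 85 from rfl, show ('V').toNat = 86 from rfl,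 show ('W').toNat = 87 from rfl, show ('X').toNat = 88 from rfl, show ('Y').toNat = 89 from rfl, show ('Z').toNat = 90 from rfl, show ('_').toNat = 95 from rfl, show ('a').toNat = 97 from rfl, show ('b').toNat = 98 from rfl, show ('c').toNat = 99 from rfl, show ('d').toNat = 100 from rfl, show ('e').toNat = 101 from rfl, show ('f').toNat = 102 from rfl, show ('g').toNat = 103 from rfl, show ('h').toNat = 104 from rfl, show ('i').toNat = 105 from rfl, show ('j').toNat = 106 from rfl, show ('k').toNat = 107 from rfl, show ('l').toNat = 108 from rfl, show ('m').toNat = 109 from rfl, show ('n').toNat = 110 from rfl, show ('o').toNat = 111 from rfl, show ('p').toNat = 112 from rfl, show ('q').toNat = 113 from rfl, show ('r').toNat = 114 from rfl, show ('s').toNat = 115 from rfl, show ('t').toNat = 116 from rfl, show ('u').toNat = 117 from rfl, show ('v').toNat = 118 from rfl, show ('w').toNat = 119 from rfl, show ('x').toNat = 120 from rfl, show ('y').toNat = 121 from rfl, show ('z').toNat = 122 from rfl]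
  omega

-- A's for-loop is B's List.all over the class
theorem loop_eq_all (l : List Char) : isB64Loop l = l.all b64ClassChar := by
  induction l with
  | nil => rfl
  | cons c rest ih =>
      simp only [isB64Loop, List.all_cons, ← mem_iff_class c]
      by_cases h : c = '='
      · simp [h, ih]
      · by_cases hc : c ∈ pyBase64urlChars <;> simp [h, hc, ih]

-- ===== VERDICT (by name: the statement is the Claim_ definition above) =====
theorem is_base64url_py_spec : Claim_equal_is_base64url_py := by
  intro text _
  unfold Spec_is_base64url_py is_base64url_py is_base64url_py_alt
  by_cases h : text = ""
  · simp [h]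
  · have hl : ¬ text.toList.isEmpty := by
      simp only [List.isEmpty_iff]
      intro hnil
      exact h (String.toList_inj.mp (by simp [hnil]))
    simp [h, hl, loop_eq_all]
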